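-- pv_equiv track=rewrite | github.com/Ankita-Dey/DM-Wikispeedia | Scripts/Q11-category-ratios.py | pathlen
-- ===== SOURCE A (Python) =====
-- def pathlen(tmp):
--     if len(tmp) > 1:
--         if '<' in tmp:
--             i = 0
--             while(i<len(tmp)-1):
--                 if tmp[i+1] == '<':
--                     tmp.pop(i)
--                     tmp.pop(i)
--                     if tmp[i] == '<':
--                         i-=1
--                 else:
--                     i+=1
--     return len(tmp)-1
-- ===== SOURCE B (Python) =====
-- def pathlen(tmp):
--     stack = []
--     for page in tmp:
--         if page == '<':
--             if stack:
--                 stack.pop()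
--         else:
--             stack.append(page)
--     return len(stack) - 1
-- ===== Notes on version B (the rewrite author's own statement) =====
-- stated objective: simpler
-- what changed: Replaces A's in-place index-juggling loop (repeated pop-pair removal with index backtracking on the mutated list) by a single pass over the path maintaining an explicit stack: push each page, pop on a '<' back-click, return final stack length minus one; B also does not mutate its argument.
-- outside the precondition, e.g. on pathlen(['<']): A returns 0, B returns -1; on pathlen(['<', 'a']): A returns 1, B returns 0; on pathlen(['a', '<']): A raises IndexError, B returns -1
import Mathlib
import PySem

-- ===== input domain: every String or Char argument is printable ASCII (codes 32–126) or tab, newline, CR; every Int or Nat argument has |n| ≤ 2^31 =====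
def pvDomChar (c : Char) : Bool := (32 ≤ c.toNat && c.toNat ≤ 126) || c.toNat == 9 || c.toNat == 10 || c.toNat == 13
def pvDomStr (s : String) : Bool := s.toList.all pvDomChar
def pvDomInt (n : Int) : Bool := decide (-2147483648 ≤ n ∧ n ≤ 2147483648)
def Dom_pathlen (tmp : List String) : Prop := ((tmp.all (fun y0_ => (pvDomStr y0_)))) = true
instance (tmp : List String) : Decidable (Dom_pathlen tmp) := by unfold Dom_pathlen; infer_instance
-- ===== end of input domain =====

-- B replaces A's in-place pop-pair removal loop (with index backtracking on the mutated list) by a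
-- single stack pass (push page, pop on '<');
-- equivalence is about the RETURN value only: Python A mutates its argument in place, B does not.

-- ===== PORT A =====
-- A's while-loop, step for step: state is the current list and the Int index i; each iteration either
-- advances i, or pops the pair (tmp[i], '<') and possibly decrements i.  'none' = IndexError in Python.
-- The Nat fuel only makes the recursion total (one unit per iteration; the initial 2*len+1 is never
-- exhausted on inputs where the Python loop terminates, see pathlenLoop_eq below).
def pathlenLoop : Nat → List String → Int → Option (List String)
  | 0, _, _ => none
  | fuel + 1, tmp, i =>
    if i < (tmp.length : Int) - 1 then
      match PySem.List.pyGet? tmp (i + 1) with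
      | none => none
      | some x =>
        if x = "<" then
          match PySem.List.pop? tmp i with
          | none => none
          | some (_, t1) =>
            match PySem.List.pop? t1 i with
            | none => none
            | some (_, t2) =>
              match PySem.List.pyGet? t2 i with
              | none => none
              | some y => pathlenLoop fuel t2 (if y = "<" then i - 1 else i)
        else pathlenLoop fuel tmp (i + 1)
    else some tmp

def pathlen (tmp : List String) : Int :=
  if (tmp.length : Int) > 1 then
    if tmp.contains "<" then
      match pathlenLoop (2 * tmp.length + 1) tmp 0 with
      | some t => (t.length : Int) - 1
      | none => 0          -- IndexError in Python; unreachable under Pre_pathlen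
    else (tmp.length : Int) - 1
  else (tmp.length : Int) - 1

-- ===== PORT B =====
def pathlenStep (st : List String) (page : String) : List String :=
  if page = "<" then (if st = [] then st else st.dropLast) else st ++ [page]

def pathlen_alt (tmp : List String) : Int :=
  ((tmp.foldl pathlenStep []).length : Int) - 1

-- ===== PRECONDITION & SPEC =====
-- running balance (#pages − #back-clicks) of a list, from a given start value
def pvBalFrom (b : Int) : List String → Int
  | [] => b
  | x :: l => pvBalFrom (if x = "<" then b - 1 else b + 1) l

def pvBal (l : List String) : Int := pvBalFrom 0 l

-- every '<' at position j, seen with n pages already on the stack, has a page to remove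
-- (n + prefix balance ≥ 1), is not the last element, and if it empties the stack the next
-- element is not another '<'
def pvGood (n : Int) (rest : List String) : Prop :=
  ∀ j, (h : j < rest.length) → rest[j] = "<" →
    1 ≤ n + pvBal (rest.take j) ∧ j + 1 < rest.length ∧
      (n + pvBal (rest.take j) = 1 → rest[j + 1]? ≠ some "<")

-- Pre_ excludes malformed navigation paths: a back-click '<' with no earlier page left to return to
-- (leading '<', or a '<' that empties the history and is followed by another '<') or '<' as the final
-- element.  On those inputs A raises IndexError or returns a length counting a stray '<' as a page.
def Pre_pathlen (tmp : List String) : Prop := pvGood 0 tmp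
instance (tmp : List String) : Decidable (Pre_pathlen tmp) := by
  unfold Pre_pathlen pvGood; infer_instance

def pvWitness_pathlen : List String := ["Dog", "Cat", "<", "Fish"]

def Spec_pathlen (tmp : List String) (out : Int) : Prop := out = pathlen_alt tmp
instance (tmp : List String) (out : Int) : Decidable (Spec_pathlen tmp out) := by
  unfold Spec_pathlen; infer_instance

-- ===== CLAIM (what is proved, stated in full; the proofs are below) =====
def Claim_equal_pathlen : Prop :=
  ∀ (tmp : List String), Dom_pathlen tmp → Pre_pathlen tmp → Spec_pathlen tmp (pathlen tmp)

-- ===== LEMMAS AND PROOFS =====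

theorem pv_len_pos {α : Type} (S : List α) (h : S ≠ []) : 0 < S.length := by
  cases S with
  | nil => exact absurd rfl h
  | cons a l => simp

theorem pvBalFrom_shift (l : List String) : ∀ b : Int, pvBalFrom b l = b + pvBalFrom 0 l := by
  induction l with
  | nil => intro b; simp [pvBalFrom]
  | cons x xs ih =>
    intro b
    simp only [pvBalFrom]
    rw [ih]
    conv_rhs => rw [ih]
    split <;> ring

theorem pvBal_cons (x : String) (l : List String) :
    pvBal (x :: l) = (if x = "<" then (-1 : Int) else 1) + pvBal l := by
  simp only [pvBal, pvBalFrom]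
  rw [pvBalFrom_shift]
  split <;> ring

theorem pvGood_tail (n : Int) (x : String) (rest : List String)
    (h : pvGood n (x :: rest)) :
    pvGood (n + (if x = "<" then -1 else 1)) rest := by
  intro j hj hx
  have h' := h (j + 1) (by simp; omega) (by simpa using hx)
  have hb : pvBal ((x :: rest).take (j + 1)) = (if x = "<" then (-1:Int) else 1) + pvBal (rest.take j) := by
    rw [List.take_succ_cons]; exact pvBal_cons x (rest.take j)
  obtain ⟨h1, h2, h3⟩ := h'
  rw [hb] at h1 h3
  refine ⟨by split at h1 <;> split <;> simp_all <;> linarith, by simp at h2; omega, fun he => ?_⟩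
  have := h3 (by split at he <;> split <;> simp_all <;> linarith)
  simpa using this

theorem pathlenStep_lt (S : List String) (hS : S ≠ []) : pathlenStep S "<" = S.dropLast := by
  simp [pathlenStep, hS]

theorem pathlenStep_push (S : List String) (x : String) (hx : x ≠ "<") :
    pathlenStep S x = S ++ [x] := by
  simp [pathlenStep, hx]

theorem pv_foldl_no_lt (l : List String) (h : "<" ∉ l) :
    ∀ acc : List String, List.foldl pathlenStep acc l = acc ++ l := by
  induction l with
  | nil => intro acc; simp
  | cons x xs ih =>
    intro acc
    have hx : x ≠ "<" := fun e => h (e ▸ (List.mem_cons_self : x ∈ x :: xs))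
    rw [List.foldl_cons, pathlenStep_push acc x hx,
        ih (fun hm => h (List.mem_cons_of_mem _ hm)) (acc ++ [x])]
    simp

theorem pop_last_append (S rest : List String) (hS : S ≠ []) :
    ∃ a, PySem.List.pop? (S ++ rest) ((S.length : Int) - 1) = some (a, S.dropLast ++ rest) := by
  have hs : 0 < S.length := pv_len_pos S hS
  have hc : ((S.length : Int) - 1) = ((S.length - 1 : Nat) : Int) := by omega
  have hlt : S.length - 1 < (S ++ rest).length := by simp; omega
  refine ⟨(S ++ rest)[S.length - 1], ?_⟩
  rw [hc, PySem.List.pop?_natCast _ _ hlt,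
      List.eraseIdx_append_of_lt_length (by omega) rest,
      ← List.dropLast_eq_eraseIdx (by omega)]

theorem pop_mid_append (P : List String) (r : String) (rest : List String) :
    ∃ a, PySem.List.pop? (P ++ r :: rest) ((P.length : Int)) = some (a, P ++ rest) := by
  have hlt : P.length < (P ++ r :: rest).length := by simp
  refine ⟨(P ++ r :: rest)[P.length], ?_⟩
  rw [PySem.List.pop?_natCast _ _ hlt,
      List.eraseIdx_append_of_length_le (le_refl _) (r :: rest)]
  simp

-- the loop simulation: A's loop from state (S ++ rest, |S|-1) computes B's stack fold
theorem pathlenLoop_eq (fuel : Nat) : ∀ (rest S : List String), rest.length < fuel → S ≠ [] →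
    ("<") ∉ S → pvGood ((S.length : Nat) : Int) rest →
    pathlenLoop fuel (S ++ rest) ((S.length : Int) - 1) = some (List.foldl pathlenStep S rest) := by
  induction fuel with
  | zero => intro rest S h _ _ _; omega
  | succ f ih =>
    intro rest S hf hS hlt hg
    have hs : 0 < S.length := pv_len_pos S hS
    cases rest with
    | nil =>
      rw [List.append_nil]
      simp only [pathlenLoop]
      rw [if_neg (by omega)]
      rfl
    | cons r0 rest' =>
      have hcond : ((S.length : Int) - 1) < (((S ++ r0 :: rest').length : Int) - 1) := by
        simp only [List.length_append, List.length_cons]; push_cast; omega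
      have hget : PySem.List.pyGet? (S ++ r0 :: rest') (((S.length : Int) - 1) + 1) = some r0 := by
        rw [show ((S.length : Int) - 1) + 1 = ((S.length : Nat) : Int) by ring]
        exact PySem.List.pyGet?_append_length S rest' r0
      by_cases hr0 : r0 = "<"
      · subst hr0
        have hg0 := hg 0 (by simp) (by simp)
        obtain ⟨hb0, hlen0, hne0⟩ := hg0
        cases rest' with
        | nil => simp at hlen0
        | cons r1 rest'' =>
          obtain ⟨a1, e1⟩ := pop_last_append S ("<" :: r1 :: rest'') hS
          have hcast : ((S.dropLast.length : Nat) : Int) = (S.length : Int) - 1 := by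
            simp only [List.length_dropLast]; omega
          obtain ⟨a2, e2⟩ := pop_mid_append S.dropLast "<" (r1 :: rest'')
          rw [hcast] at e2
          have hy : PySem.List.pyGet? (S.dropLast ++ r1 :: rest'') ((S.length : Int) - 1) = some r1 := by
            rw [← hcast]; exact PySem.List.pyGet?_append_length _ _ _
          by_cases hr1 : r1 = "<"
          · subst hr1
            have hS2 : (2 : Int) ≤ (S.length : Int) := by
              by_contra hcon
              have h1 : ((S.length : Nat) : Int) + pvBal (List.take 0 ("<" :: "<" :: rest'')) = 1 := by
                simp only [List.take_zero]
                simp only [pvBal, pvBalFrom]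
                omega
              exact hne0 h1 (by simp)
            have hd : S.dropLast ≠ [] := by
              intro h
              have := congrArg List.length h
              simp only [List.length_dropLast, List.length_nil] at this
              omega
            have hgood := pvGood_tail _ "<" _ hg
            rw [show ((S.length : Nat) : Int) + (if ("<" : String) = "<" then (-1:Int) else 1)
                  = ((S.dropLast.length : Nat) : Int) from by rw [hcast, if_pos rfl]; ring] at hgood
            have hrec := ih ("<" :: rest'') S.dropLast (by simp at hf ⊢; omega) hd
              (fun hm => hlt ((List.dropLast_sublist S).subset hm)) hgood
            rw [hcast] at hrec
            rw [List.foldl_cons, pathlenStep_lt S hS]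
            simp only [pathlenLoop]
            rw [if_pos hcond, hget]
            simp only [e1, e2, hy, if_pos]
            exact hrec
          · have hgood1 := pvGood_tail _ "<" _ hg
            have hgood2 := pvGood_tail _ r1 _ hgood1
            rw [show ((S.length : Nat) : Int) + (if ("<" : String) = "<" then (-1:Int) else 1)
                  + (if r1 = "<" then (-1:Int) else 1)
                  = (((S.dropLast ++ [r1]).length : Nat) : Int) from by
                simp only [if_neg hr1, List.length_append, List.length_cons, List.length_nil,
                  List.length_dropLast]
                push_cast
                omega] at hgood2
            have hrec := ih rest'' (S.dropLast ++ [r1]) (by simp at hf ⊢; omega) (by simp)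
              (by
                intro hm
                rcases List.mem_append.mp hm with h | h
                · exact hlt ((List.dropLast_sublist S).subset h)
                · simp at h; exact hr1 h.symm)
              hgood2
            rw [List.append_assoc, List.singleton_append] at hrec
            rw [show (((S.dropLast ++ [r1]).length : Nat) : Int) - 1 = (S.length : Int) - 1 from by
                simp only [List.length_append, List.length_cons, List.length_nil,
                  List.length_dropLast]
                push_cast
                omega] at hrec
            rw [List.foldl_cons, pathlenStep_lt S hS, List.foldl_cons,
                pathlenStep_push S.dropLast r1 hr1]
            simp only [pathlenLoop]
            rw [if_pos hcond, hget]
            simp only [e1, e2, hy, if_pos, if_neg hr1]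
            exact hrec
      · have hgood := pvGood_tail _ r0 _ hg
        rw [show ((S.length : Nat) : Int) + (if r0 = "<" then (-1:Int) else 1)
              = (((S ++ [r0]).length : Nat) : Int) from by
            simp only [if_neg hr0, List.length_append, List.length_cons, List.length_nil]
            push_cast
            omega] at hgood
        have hrec := ih rest' (S ++ [r0]) (by simp at hf ⊢; omega) (by simp)
          (by
            intro hm
            rcases List.mem_append.mp hm with h | h
            · exact hlt h
            · simp at h; exact hr0 h.symm)
          hgood
        rw [List.append_assoc, List.singleton_append] at hrec
        rw [show (((S ++ [r0]).length : Nat) : Int) - 1 = (S.length : Int) from by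
            simp only [List.length_append, List.length_cons, List.length_nil]
            push_cast
            omega] at hrec
        rw [List.foldl_cons, pathlenStep_push S r0 hr0]
        simp only [pathlenLoop]
        rw [if_pos hcond, hget]
        simp only [if_neg hr0]
        rw [show ((S.length : Int) - 1) + 1 = (S.length : Int) from by ring]
        exact hrec

theorem pv_head_ne (t0 : String) (rest : List String) (hp : Pre_pathlen (t0 :: rest)) :
    t0 ≠ "<" := by
  intro e
  obtain ⟨h1, _, _⟩ := hp 0 (by simp) (by simpa using e)
  simp only [List.take_zero] at h1
  simp only [pvBal, pvBalFrom] at h1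
  omega

theorem pathlen_spec' (tmp : List String) (hp : Pre_pathlen tmp) :
    pathlen tmp = pathlen_alt tmp := by
  unfold pathlen pathlen_alt
  by_cases hl : ((tmp.length : Int) > 1)
  · rw [if_pos hl]
    cases tmp with
    | nil => simp at hl
    | cons t0 rest =>
      have ht0 : t0 ≠ "<" := pv_head_ne t0 rest hp
      by_cases hc : (t0 :: rest).contains "<"
      · rw [if_pos hc]
        have hgood : pvGood ((([t0] : List String).length : Nat) : Int) rest := by
          have := pvGood_tail 0 t0 rest hp
          rw [show (0 : Int) + (if t0 = "<" then (-1:Int) else 1)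
                = ((([t0] : List String).length : Nat) : Int) from by
              simp [if_neg ht0]] at this
          exact this
        have hrest := pathlenLoop_eq (2 * (t0 :: rest).length + 1) rest [t0]
          (by simp; omega) (by simp) (by intro hm; simp at hm; exact ht0 hm.symm) hgood
        rw [List.singleton_append] at hrest
        rw [show ((([t0] : List String).length : Int) - 1) = (0 : Int) from by simp] at hrest
        rw [hrest]
        show ((List.foldl pathlenStep [t0] rest).length : Int) - 1 = _
        rw [List.foldl_cons, pathlenStep_push [] t0 ht0, List.nil_append]
      · rw [if_neg hc]
        have hmem : "<" ∉ (t0 :: rest) := fun hm => hc (List.contains_iff_mem.mpr hm)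
        rw [pv_foldl_no_lt _ hmem []]
        simp
  · rw [if_neg hl]
    cases tmp with
    | nil => simp
    | cons t0 rest =>
      cases rest with
      | nil =>
        have ht0 : t0 ≠ "<" := pv_head_ne t0 [] hp
        simp [pathlenStep, ht0]
      | cons t1 r =>
        exfalso
        simp only [List.length_cons] at hl
        push_cast at hl
        omega

-- ===== VERDICT (by name: the statement is the Claim_ definition above) =====
theorem pathlen_spec : Claim_equal_pathlen := by
  intro tmp _ hp
  exact pathlen_spec' tmp hp
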